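-- pv_equiv track=rewrite | github.com/chlendyd7/Algorithm | 레거시/Python/리뉴얼/2025/January/sec/7/practice/110 옮기기.py | find_110s
-- ===== SOURCE A (Python) =====
-- def find_110s(string):
--     stk = ''
--     cnt = 0
--
--     for char in string:
--         stk += char
--         while len(stk) > 2 and stk[-3:] == '110':
--             stk = stk[:-3]
--             cnt += 1
--     return stk, cnt
-- ===== SOURCE B (Python) =====
-- def find_110s(string):
--     original_len = len(string)
--     while '110' in string:
--         string = string.replace('110', '')
--     return string, (original_len - len(string)) // 3
-- ===== Notes on version B (the rewrite author's own statement) =====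
-- stated objective: simpler
-- what changed: B replaces the single-pass character stack (append each char, pop when the top three match the pattern) by a repeated global replace to a fixpoint, recovering the removal count from the length difference divided by 3; correctness rests on the pattern having no self-overlap, so the deletion system is confluent. Each pass runs in C instead of a per-character Python loop.
import Mathlib
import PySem

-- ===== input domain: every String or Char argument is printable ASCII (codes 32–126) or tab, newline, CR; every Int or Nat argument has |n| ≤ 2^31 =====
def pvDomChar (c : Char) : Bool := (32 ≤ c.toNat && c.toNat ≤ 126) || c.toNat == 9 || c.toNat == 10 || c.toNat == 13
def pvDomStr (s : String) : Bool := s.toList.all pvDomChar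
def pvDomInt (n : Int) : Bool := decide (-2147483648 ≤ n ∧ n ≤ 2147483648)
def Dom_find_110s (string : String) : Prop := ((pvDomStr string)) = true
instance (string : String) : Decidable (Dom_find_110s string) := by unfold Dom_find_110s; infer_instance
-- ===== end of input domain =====

-- B replaces A's single-pass character stack by a repeated global replace('110','') loop,
-- recovering the removal count from the length difference; objective: simpler.

-- ===== PORT A =====
-- the inner `while len(stk) > 2 and stk[-3:] == '110': stk = stk[:-3]; cnt += 1`
def find110Pop (stk : List Char) (cnt : Int) : List Char × Int :=
  if h : 2 < PySem.List.len stk ∧ PySem.List.slice stk (some (-3)) none = ['1','1','0'] then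
    find110Pop (PySem.List.slice stk none (some (-3))) (cnt + 1)
  else
    (stk, cnt)
termination_by stk.length
decreasing_by
  obtain ⟨h1, -⟩ := h
  rw [PySem.List.slice_to_neg_ofNat stk 3 (by omega)]
  simp only [PySem.List.len_eq] at h1
  simp only [List.length_take]
  omega

def find_110s (string : String) : String × Int :=
  let r := string.toList.foldl (fun (st : List Char × Int) ch => find110Pop (st.1 ++ [ch]) st.2) ([], 0)
  (String.ofList r.1, r.2)

-- ===== PORT B =====
-- `while '110' in string: string = string.replace('110', '')`; the fuel argument only
-- makes the loop total (each pass shortens the string by ≥ 3, so fuel = len(string) suffices,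
-- proved in bGo_eq_stack below); it never changes the computed value.
def bGo : Nat → List Char → List Char
  | 0, s => s
  | fuel + 1, s =>
    if PySem.Chars.isIn ['1','1','0'] s then
      bGo fuel (PySem.Chars.replace s ['1','1','0'] [])
    else s

def find_110s_alt (string : String) : String × Int :=
  let originalLen := PySem.Str.len string
  let t := bGo string.toList.length string.toList
  (String.ofList t, PySem.Int.floordiv (originalLen - PySem.Chars.len t) 3)

-- ===== PRECONDITION & SPEC =====
def Spec_find_110s (string : String) (out : String × Int) : Prop := out = find_110s_alt string
instance (string : String) (out : String × Int) : Decidable (Spec_find_110s string out) := by unfold Spec_find_110s; infer_instance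

-- ===== CLAIM (what is proved, stated in full; the proofs are below) =====
def Claim_equal_find_110s : Prop := ∀ (string : String), Dom_find_110s string → Spec_find_110s string (find_110s string)

-- ===== LEMMAS AND PROOFS =====

-- `110` as a list of chars
def pv110 : List Char := ['1','1','0']

-- "contains no occurrence of '110'"
def pvFree (l : List Char) : Prop := ¬ pv110 <:+: l

-- the loop condition of A's inner while is exactly "stk ends with '110'"
lemma pvCond_iff (stk : List Char) :
    (2 < PySem.List.len stk ∧ PySem.List.slice stk (some (-3)) none = ['1','1','0']) ↔ pv110 <:+ stk := by
  constructor
  · rintro ⟨h1, h2⟩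
    simp only [PySem.List.len_eq] at h1
    rw [PySem.List.slice_from_neg_ofNat stk 3 (by omega)] at h2
    rw [show pv110 = List.drop (stk.length - 3) stk from h2.symm]
    exact List.drop_suffix _ _
  · rintro ⟨p, hp⟩
    have hlen : stk.length = p.length + 3 := by subst hp; simp [pv110]
    constructor
    · simp only [PySem.List.len_eq]; omega
    · rw [PySem.List.slice_from_neg_ofNat stk 3 (by omega)]
      subst hp
      rw [show (p ++ pv110).length - 3 = p.length from by simp [pv110]]
      exact List.drop_left (l₁ := p) (l₂ := pv110)

-- A's while loop shifts the counter uniformly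
lemma pvPop_shift : ∀ (n : Nat) (x : List Char), x.length ≤ n → ∀ c d : Int,
    find110Pop x (c + d) = ((find110Pop x c).1, (find110Pop x c).2 + d) := by
  intro n
  induction n with
  | zero =>
    intro x hx c d
    have hcond : ¬ (2 < PySem.List.len x ∧ PySem.List.slice x (some (-3)) none = ['1','1','0']) := by
      rintro ⟨h1, -⟩; simp only [PySem.List.len_eq] at h1; omega
    rw [find110Pop, dif_neg hcond, find110Pop, dif_neg hcond]
  | succ n ih =>
    intro x hx c d
    by_cases hcond : 2 < PySem.List.len x ∧ PySem.List.slice x (some (-3)) none = ['1','1','0']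
    · have h1 := hcond.1
      simp only [PySem.List.len_eq] at h1
      have hxl : (PySem.List.slice x none (some (-3))).length ≤ n := by
        rw [PySem.List.slice_to_neg_ofNat x 3 (by omega)]
        simp only [List.length_take]; omega
      have hstep : ∀ e : Int, find110Pop x e = find110Pop (PySem.List.slice x none (some (-3))) (e + 1) := by
        intro e; rw [find110Pop, dif_pos hcond]
      rw [hstep (c + d), hstep c]
      rw [show c + d + 1 = (c + 1) + d from by ring]
      exact ih _ hxl (c + 1) d
    · rw [find110Pop, dif_neg hcond, find110Pop, dif_neg hcond]

lemma pvPop_shift' (x : List Char) (c : Int) :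
    find110Pop x c = ((find110Pop x 0).1, (find110Pop x 0).2 + c) := by
  have := pvPop_shift x.length x le_rfl 0 c
  simpa using this

-- length/count invariant of A's inner while loop
lemma pvPop_cnt : ∀ (n : Nat) (x : List Char), x.length ≤ n → ∀ c : Int,
    3 * (find110Pop x c).2 + ((find110Pop x c).1.length : Int) = 3 * c + x.length := by
  intro n
  induction n with
  | zero =>
    intro x hx c
    have hcond : ¬ (2 < PySem.List.len x ∧ PySem.List.slice x (some (-3)) none = ['1','1','0']) := by
      rintro ⟨h1, -⟩; simp only [PySem.List.len_eq] at h1; omega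
    rw [find110Pop, dif_neg hcond]
  | succ n ih =>
    intro x hx c
    by_cases hcond : 2 < PySem.List.len x ∧ PySem.List.slice x (some (-3)) none = ['1','1','0']
    · have h1 := hcond.1
      simp only [PySem.List.len_eq] at h1
      have hsl : (PySem.List.slice x none (some (-3))).length = x.length - 3 := by
        rw [PySem.List.slice_to_neg_ofNat x 3 (by omega)]
        simp only [List.length_take]; omega
      have hstep : ∀ e : Int, find110Pop x e = find110Pop (PySem.List.slice x none (some (-3))) (e + 1) := by
        intro e; rw [find110Pop, dif_pos hcond]
      rw [hstep c]
      have := ih _ (by omega : (PySem.List.slice x none (some (-3))).length ≤ n) (c + 1)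
      rw [this, hsl]
      omega
    · rw [find110Pop, dif_neg hcond]

-- the pure stack step: what one character does to the stack (count ignored)
def pvStep (stk : List Char) (ch : Char) : List Char := (find110Pop (stk ++ [ch]) 0).1

lemma pvPop_of_not_suffix {x : List Char} (h : ¬ pv110 <:+ x) (c : Int) : find110Pop x c = (x, c) := by
  rw [find110Pop, dif_neg (fun hc => h ((pvCond_iff x).mp hc))]

lemma pvPop_pop {t : List Char} (h : pvFree t) (c : Int) :
    find110Pop (t ++ pv110) c = (t, c + 1) := by
  have hcond : 2 < PySem.List.len (t ++ pv110) ∧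
      PySem.List.slice (t ++ pv110) (some (-3)) none = ['1','1','0'] :=
    (pvCond_iff _).mpr ⟨t, rfl⟩
  rw [find110Pop, dif_pos hcond]
  have hsl : PySem.List.slice (t ++ pv110) none (some (-3)) = t := by
    rw [PySem.List.slice_to_neg_ofNat _ 3 (by omega)]
    rw [show (t ++ pv110).length - 3 = t.length from by simp [pv110]]
    exact List.take_left
  rw [hsl]
  exact pvPop_of_not_suffix (fun hs => h hs.isInfix) (c + 1)

-- decomposing "ends with 110" through the last character
lemma pvConcat3 {xs p : List Char} {c : Char} (h : xs ++ [c] = p ++ pv110) :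
    c = '0' ∧ xs = p ++ ['1','1'] := by
  rw [show p ++ pv110 = (p ++ ['1','1']) ++ ['0'] from by simp [pv110]] at h
  have := List.append_singleton_inj.mp h
  exact ⟨this.2, this.1⟩

lemma pvInfix_concat {l xs : List Char} {c : Char} (h : l <:+: xs ++ [c]) :
    l <:+: xs ∨ l <:+ xs ++ [c] := by
  obtain ⟨s, t, hst⟩ := h
  rcases List.eq_nil_or_concat t with rfl | ⟨t', c', rfl⟩
  · right; exact ⟨s, by simpa using hst⟩
  · left
    have : xs ++ [c] = (s ++ l ++ t') ++ [c'] := by simpa [List.append_assoc] using hst.symm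
    have h2 := List.append_singleton_inj.mp this
    exact ⟨s, t', by rw [← h2.1]⟩

lemma pvStep_no_suffix {stk : List Char} {ch : Char} (h : ¬ pv110 <:+ stk ++ [ch]) :
    pvStep stk ch = stk ++ [ch] := by
  simp [pvStep, pvPop_of_not_suffix h]

lemma pvStep_pop {t : List Char} (h : pvFree t) :
    pvStep (t ++ ['1','1']) '0' = t := by
  simp [pvStep, show (t ++ ['1','1']) ++ ['0'] = t ++ pv110 from by simp [pv110], pvPop_pop h]

lemma pvFree_of_infix {l₁ l₂ : List Char} (h : l₁ <:+: l₂) (hf : pvFree l₂) : pvFree l₁ :=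
  fun hi => hf (hi.trans h)

lemma pvStep_free {stk : List Char} (h : pvFree stk) (ch : Char) : pvFree (pvStep stk ch) := by
  by_cases hs : pv110 <:+ stk ++ [ch]
  · obtain ⟨p, hp⟩ := hs
    obtain ⟨rfl, rfl⟩ := pvConcat3 hp.symm
    have hfp : pvFree p := pvFree_of_infix (List.prefix_append p ['1','1']).isInfix h
    rw [pvStep_pop hfp]
    exact hfp
  · rw [pvStep_no_suffix hs]
    intro hi
    rcases pvInfix_concat hi with h1 | h2
    · exact h h1
    · exact hs h2

lemma pvStep_one (stk : List Char) : pvStep stk '1' = stk ++ ['1'] := by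
  refine pvStep_no_suffix ?_
  rintro ⟨p, hp⟩
  exact absurd (pvConcat3 hp.symm).1 (by decide)

-- processing a '110' block from a 110-free stack cancels it out
lemma pvFold_110 {stk : List Char} (h : pvFree stk) (y : List Char) :
    ('1' :: '1' :: '0' :: y).foldl pvStep stk = y.foldl pvStep stk := by
  simp only [List.foldl_cons]
  rw [pvStep_one stk, pvStep_one (stk ++ ['1'])]
  rw [show (stk ++ ['1']) ++ ['1'] = stk ++ ['1','1'] from by simp]
  rw [pvStep_pop h]

-- the left-to-right single replace pass, as a recursion mirroring PySem.Chars.replace.go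
def pvRep (l : List Char) : List Char :=
  match l with
  | [] => []
  | c :: t =>
    if (['1','1','0'] : List Char).isPrefixOf (c :: t) then pvRep (t.drop 2)
    else c :: pvRep t
termination_by l.length
decreasing_by
  · simp only [List.length_drop, List.length_cons]; omega
  · simp

lemma pvGo_eq_rep : ∀ (fuel : Nat) (l acc : List Char), l.length ≤ fuel →
    PySem.Chars.replace.go ['1','1','0'] [] fuel l acc = acc.reverse ++ pvRep l := by
  intro fuel
  induction fuel with
  | zero =>
    intro l acc hl
    have : l = [] := List.length_eq_zero_iff.mp (by omega)
    subst this
    simp [PySem.Chars.replace.go, pvRep]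
  | succ n ih =>
    intro l acc hl
    cases l with
    | nil => simp [PySem.Chars.replace.go, pvRep]
    | cons c t =>
      rw [PySem.Chars.replace.go]
      by_cases hp : (['1','1','0'] : List Char).isPrefixOf (c :: t)
      · rw [if_pos hp]
        rw [pvRep, if_pos hp]
        have hlen : (List.drop 3 (c :: t)).length ≤ n := by
          simp only [List.length_drop, List.length_cons] at *
          omega
        rw [show (List.drop (['1','1','0'] : List Char).length (c :: t)) = t.drop 2 from by simp]
        rw [show ([] : List Char).reverse ++ acc = acc from by simp]
        exact ih (t.drop 2) acc (by simpa using hlen)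
      · rw [if_neg hp]
        rw [pvRep, if_neg hp]
        rw [ih t (c :: acc) (by simp at hl ⊢; omega)]
        simp

lemma pvReplace_eq_rep (s : List Char) : PySem.Chars.replace s ['1','1','0'] [] = pvRep s := by
  rw [PySem.Chars.replace]
  rw [if_neg (by decide)]
  simpa using pvGo_eq_rep s.length s [] le_rfl

-- the stack fold is invariant under one replace pass
lemma pvFold_rep : ∀ (n : Nat) (l : List Char), l.length ≤ n → ∀ (stk : List Char), pvFree stk →
    l.foldl pvStep stk = (pvRep l).foldl pvStep stk := by
  intro n
  induction n with
  | zero =>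
    intro l hl stk _
    have : l = [] := List.length_eq_zero_iff.mp (by omega)
    subst this; simp [pvRep]
  | succ n ih =>
    intro l hl stk hfree
    cases l with
    | nil => simp [pvRep]
    | cons c t =>
      by_cases hp : (['1','1','0'] : List Char).isPrefixOf (c :: t)
      · have hpre : (['1','1','0'] : List Char) <+: c :: t := List.isPrefixOf_iff_prefix.mp hp
        obtain ⟨r, hr⟩ := hpre
        have hc : c = '1' ∧ t = '1' :: '0' :: r := by
          simpa using hr.symm
        obtain ⟨rfl, rfl⟩ := hc
        rw [pvRep, if_pos hp]
        rw [show List.drop 2 ('1' :: '0' :: r) = r from rfl]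
        rw [pvFold_110 hfree r]
        exact ih r (by simp at hl; omega) stk hfree
      · rw [pvRep, if_neg hp]
        simp only [List.foldl_cons]
        exact ih t (by simp at hl; omega) (pvStep stk c) (pvStep_free hfree c)

-- a 110-free tail passes through the stack untouched
lemma pvFold_id : ∀ (l stk : List Char), pvFree (stk ++ l) → l.foldl pvStep stk = stk ++ l := by
  intro l
  induction l with
  | nil => intro stk _; simp
  | cons c t ih =>
    intro stk h
    have hstep : pvStep stk c = stk ++ [c] := by
      refine pvStep_no_suffix (fun hs => h ?_)
      exact hs.isInfix.trans (by exact ⟨[], t, by simp⟩)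
    simp only [List.foldl_cons, hstep]
    rw [ih (stk ++ [c]) (by simpa using h)]
    simp

lemma pvRep_le : ∀ (n : Nat) (l : List Char), l.length ≤ n → (pvRep l).length ≤ l.length := by
  intro n
  induction n with
  | zero =>
    intro l hl
    have : l = [] := List.length_eq_zero_iff.mp (by omega)
    subst this; simp [pvRep]
  | succ n ih =>
    intro l hl
    cases l with
    | nil => simp [pvRep]
    | cons c t =>
      rw [pvRep]
      by_cases hp : (['1','1','0'] : List Char).isPrefixOf (c :: t)
      · rw [if_pos hp]
        have := ih (t.drop 2) (by simp at hl ⊢; omega)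
        simp only [List.length_drop] at this
        simp only [List.length_cons]
        omega
      · rw [if_neg hp]
        have := ih t (by simp at hl; omega)
        simp only [List.length_cons]
        omega

lemma pvRep_lt : ∀ (n : Nat) (l : List Char), l.length ≤ n → pv110 <:+: l →
    (pvRep l).length + 3 ≤ l.length := by
  intro n
  induction n with
  | zero =>
    intro l hl hi
    have : l = [] := List.length_eq_zero_iff.mp (by omega)
    subst this
    exact absurd (List.IsInfix.length_le hi) (by simp [pv110])
  | succ n ih =>
    intro l hl hi
    cases l with
    | nil => exact absurd (List.IsInfix.length_le hi) (by simp [pv110])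
    | cons c t =>
      rw [pvRep]
      by_cases hp : (['1','1','0'] : List Char).isPrefixOf (c :: t)
      · rw [if_pos hp]
        have := pvRep_le (t.drop 2).length (t.drop 2) le_rfl
        have hpre : (['1','1','0'] : List Char) <+: c :: t := List.isPrefixOf_iff_prefix.mp hp
        have h3 : 3 ≤ (c :: t).length := by simpa using hpre.length_le
        simp only [List.length_drop] at this
        simp only [List.length_cons] at *
        omega
      · rw [if_neg hp]
        have hit : pv110 <:+: t := by
          rcases List.infix_cons_iff.mp hi with h1 | h2
          · exact absurd (List.isPrefixOf_iff_prefix.mpr h1) hp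
          · exact h2
        have := ih t (by simp at hl; omega) hit
        simp only [List.length_cons]
        omega

-- B's fueled while loop computes the stack normal form
lemma pvBGo_eq_stack : ∀ (fuel : Nat) (s : List Char), s.length ≤ 3 * fuel + 2 →
    bGo fuel s = s.foldl pvStep [] := by
  intro fuel
  induction fuel with
  | zero =>
    intro s hs
    have hfree : pvFree s := by
      intro hi
      have := List.IsInfix.length_le hi
      simp [pv110] at this
      omega
    rw [bGo]
    rw [pvFold_id s [] (by simpa using hfree)]
    simp
  | succ n ih =>
    intro s hs
    rw [bGo]
    by_cases hin : PySem.Chars.isIn ['1','1','0'] s = true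
    · rw [if_pos hin]
      have hinf : pv110 <:+: s := (PySem.Chars.isIn_iff_infix _ _).mp hin
      have hlt := pvRep_lt s.length s le_rfl hinf
      rw [pvReplace_eq_rep]
      rw [ih (pvRep s) (by omega)]
      exact (pvFold_rep s.length s le_rfl [] (by intro hi; simpa [pv110] using List.IsInfix.length_le hi)).symm
    · rw [if_neg hin]
      have hfree : pvFree s := (PySem.Chars.isIn_eq_false_iff _ _).mp (by simpa using hin)
      rw [pvFold_id s [] (by simpa using hfree)]
      simp

-- A's outer fold: first component is the pure stack fold
lemma pvFoldA_fst : ∀ (l : List Char) (stk : List Char) (c : Int),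
    (l.foldl (fun (st : List Char × Int) ch => find110Pop (st.1 ++ [ch]) st.2) (stk, c)).1
      = l.foldl pvStep stk := by
  intro l
  induction l with
  | nil => intro stk c; rfl
  | cons ch t ih =>
    intro stk c
    simp only [List.foldl_cons]
    rw [pvPop_shift' (stk ++ [ch]) c]
    exact ih _ _

-- A's outer fold: length/count invariant
lemma pvFoldA_cnt : ∀ (l : List Char) (stk : List Char) (c : Int),
    3 * (l.foldl (fun (st : List Char × Int) ch => find110Pop (st.1 ++ [ch]) st.2) (stk, c)).2
      + ((l.foldl (fun (st : List Char × Int) ch => find110Pop (st.1 ++ [ch]) st.2) (stk, c)).1.length : Int)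
      = 3 * c + stk.length + l.length := by
  intro l
  induction l with
  | nil => intro stk c; simp
  | cons ch t ih =>
    intro stk c
    simp only [List.foldl_cons]
    have hpc := pvPop_cnt (stk ++ [ch]).length (stk ++ [ch]) le_rfl c
    rw [show (find110Pop (stk ++ [ch]) c)
          = ((find110Pop (stk ++ [ch]) c).1, (find110Pop (stk ++ [ch]) c).2) from rfl]
    rw [ih ((find110Pop (stk ++ [ch]) c).1) ((find110Pop (stk ++ [ch]) c).2)]
    simp only [List.length_append, List.length_cons, List.length_nil] at *
    push_cast at *
    omega

-- ===== VERDICT (by name: the statement is the Claim_ definition above) =====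
theorem find_110s_spec : Claim_equal_find_110s := by
  intro s _
  unfold Spec_find_110s find_110s find_110s_alt
  set L := s.toList with hL
  have hfst := pvFoldA_fst L [] 0
  have hcnt := pvFoldA_cnt L [] 0
  have hb := pvBGo_eq_stack L.length L (by omega)
  set r := L.foldl (fun (st : List Char × Int) ch => find110Pop (st.1 ++ [ch]) st.2) ([], 0) with hr
  refine Prod.ext ?_ ?_
  · simp only []
    rw [hb, ← hfst]
  · simp only []
    rw [hb, ← hfst]
    have hlen : (L.length : Int) - (r.1.length : Int) = 3 * r.2 := by
      simp only [List.length_nil] at hcnt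
      omega
    rw [show PySem.Str.len s = (L.length : Int) from by simp [PySem.Str.len, hL]]
    rw [show PySem.Chars.len r.1 = (r.1.length : Int) from by simp [PySem.Chars.len_eq]]
    rw [hlen]
    rw [PySem.Int.floordiv_eq_ediv_of_pos (by norm_num)]
    exact (Int.mul_ediv_cancel_left (a := 3) r.2 (by norm_num)).symm
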